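-- pv_equiv track=rewrite | github.com/tanmayagarwal1/Code | Algorithms/Grid_in_Progress.py | FirstOne
-- ===== SOURCE A (Python) =====
-- def FirstOne(grid):
-- 	def Helper(arr, l, h):
-- 		if h < l : return -1
-- 		while h >= l :
-- 			mid = l + (h - l)//2
-- 			if arr[mid] == 1 and (arr[mid - 1] == 0 or mid == 0 ):
-- 				return mid
-- 			if arr[mid] == 0 : l = mid + 1
-- 			else : h = mid - 1
-- 		return - 1
--
-- 	m, n = len(grid), len(grid[0])
-- 	if m == 0 or n == 0 : raise ValueError
-- 	for i in range(m):
-- 		idx = Helper(grid[i], 0, n - 1)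
-- 		if idx != - 1 :
-- 			break
-- 	return i, idx
-- ===== SOURCE B (Python) =====
-- def first_one(arr, l, h):
--     if h < l:
--         return -1
--     mid = l + (h - l) // 2
--     if arr[mid] == 1 and (mid == 0 or arr[mid - 1] == 0):
--         return mid
--     if arr[mid] == 0:
--         return first_one(arr, mid + 1, h)
--     return first_one(arr, l, mid - 1)
--
--
-- def FirstOne(grid):
--     m, n = len(grid), len(grid[0])
--     if m == 0 or n == 0:
--         raise ValueError
--     for i, row in enumerate(grid):
--         idx = first_one(row, 0, n - 1)
--         if idx != -1:
--             return i, idx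
--     return m - 1, -1
-- ===== Notes on version B (the rewrite author's own statement) =====
-- stated objective: simpler
-- what changed: Same binary-search semantics (needed because A's result on arbitrary unsorted grids is decision-path-dependent), but decomposed differently: the helper is a guarded recursion instead of a while loop with an up-front h<l check, the found-guard short-circuits on mid==0 first, and the row loop returns early from enumerate with an explicit no-1 fallback instead of break plus leftover loop variables.
-- outside the precondition, e.g. on FirstOne([[0, 0], [1]]): A returns (1, 0), B returns (1, 0)
import Mathlib
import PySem

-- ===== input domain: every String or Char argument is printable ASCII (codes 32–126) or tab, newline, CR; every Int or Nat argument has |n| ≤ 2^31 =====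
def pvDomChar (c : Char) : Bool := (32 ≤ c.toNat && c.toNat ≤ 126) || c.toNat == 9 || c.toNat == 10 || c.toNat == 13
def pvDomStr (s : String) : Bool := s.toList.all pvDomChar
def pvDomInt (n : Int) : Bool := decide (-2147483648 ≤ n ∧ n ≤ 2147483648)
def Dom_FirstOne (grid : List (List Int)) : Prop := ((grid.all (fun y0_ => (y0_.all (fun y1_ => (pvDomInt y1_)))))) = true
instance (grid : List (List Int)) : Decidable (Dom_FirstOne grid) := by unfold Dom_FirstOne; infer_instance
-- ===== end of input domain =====

-- B keeps A's binary-search semantics (A's value on an unsorted grid depends on the search path,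
-- so an exact B must take the same path) but is decomposed differently: a guarded recursion
-- instead of a while loop, and an early-return row loop with an explicit fallback.

-- ===== PORT A =====
-- the while-loop of A's Helper; fuel (h-l).toNat + 2 never runs out: each iteration shrinks h - l
def helperLoopA (arr : List Int) : Nat → Int → Int → Int
  | 0, _, _ => -1
  | fuel+1, l, h =>
    if h ≥ l then
      let mid := l + PySem.Int.floordiv (h - l) 2
      if PySem.List.pyGetD arr mid 0 = 1 ∧ (PySem.List.pyGetD arr (mid - 1) 0 = 0 ∨ mid = 0) then
        mid
      else if PySem.List.pyGetD arr mid 0 = 0 then helperLoopA arr fuel (mid + 1) h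
      else helperLoopA arr fuel l (mid - 1)
    else -1

def HelperA (arr : List Int) (l h : Int) : Int :=
  if h < l then -1 else helperLoopA arr ((h - l).toNat + 2) l h

-- A's for-loop with break: returns Python's final (i, idx), including the leftover (m-1, -1)
def rowsA (n : Int) : List (List Int) → Int → Int × Int
  | [], i => (i - 1, -1)          -- unreachable under Pre_ (grid nonempty)
  | r :: rest, i =>
      let idx := HelperA r 0 (n - 1)
      if idx ≠ -1 ∨ rest = [] then (i, idx) else rowsA n rest (i + 1)

def FirstOne (grid : List (List Int)) : List Int :=
  let m : Int := grid.length
  let n : Int := ((grid.headD []).length : Int)   -- grid[0]; IndexError on [] is outside Pre_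
  if m = 0 ∨ n = 0 then []                        -- Python raises ValueError here; outside Pre_
  else
    let p := rowsA n grid 0
    [p.1, p.2]

-- ===== PORT B =====
-- B's recursive helper (Source B first_one); decreasing measure: the window width h - l
def firstOneB (arr : List Int) (l h : Int) : Int :=
  if hlt : h < l then -1
  else
    let mid := l + PySem.Int.floordiv (h - l) 2
    if PySem.List.pyGetD arr mid 0 = 1 ∧ (mid = 0 ∨ PySem.List.pyGetD arr (mid - 1) 0 = 0) then
      mid
    else if PySem.List.pyGetD arr mid 0 = 0 then firstOneB arr (mid + 1) h
    else firstOneB arr l (mid - 1)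
  termination_by (h - l + 1).toNat
  decreasing_by
  · have hd := PySem.Int.floordiv_eq_ediv_of_pos (a := h - l) (by omega : (0:Int) < 2)
    omega
  · have hd := PySem.Int.floordiv_eq_ediv_of_pos (a := h - l) (by omega : (0:Int) < 2)
    omega

-- B's early-return row loop (enumerate): first row whose search is not -1, with that index
def findIdxB (n : Int) : List (List Int) → Int → Option (Int × Int)
  | [], _ => none
  | row :: rest, i =>
      let idx := firstOneB row 0 (n - 1)
      if idx ≠ -1 then some (i, idx) else findIdxB n rest (i + 1)

def FirstOne_alt (grid : List (List Int)) : List Int :=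
  let m : Int := grid.length
  let n : Int := ((grid.headD []).length : Int)
  if m = 0 ∨ n = 0 then []                        -- the same ValueError guard; outside Pre_
  else
    match findIdxB n grid 0 with
    | some p => [p.1, p.2]
    | none => [m - 1, -1]

-- ===== PRECONDITION & SPEC =====
-- Pre_ excludes the empty grid and an empty first row (A raises there), and grids with a row
-- shorter than grid[0] (the binary search can then index past that row's end, so A raises an
-- IndexError on a decision-path-dependent subset of those grids that has no closed form;
-- both programs behave identically there, returning or raising together).
def Pre_FirstOne (grid : List (List Int)) : Prop :=
  grid ≠ [] ∧ 0 < (grid.headD []).length ∧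
  ∀ r ∈ grid, (grid.headD []).length ≤ r.length
instance (grid : List (List Int)) : Decidable (Pre_FirstOne grid) := by
  unfold Pre_FirstOne; infer_instance

def pvWitness_FirstOne : List (List Int) := [[0, 2], [0, 1], [1, 1]]

def Spec_FirstOne (grid : List (List Int)) (out : List Int) : Prop := out = FirstOne_alt grid
instance (grid : List (List Int)) (out : List Int) : Decidable (Spec_FirstOne grid out) := by
  unfold Spec_FirstOne; infer_instance

-- ===== CLAIM (what is proved, stated in full; the proofs are below) =====
def Claim_equal_FirstOne : Prop :=
  ∀ (grid : List (List Int)), Dom_FirstOne grid → Pre_FirstOne grid →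
    Spec_FirstOne grid (FirstOne grid)

-- ===== LEMMAS AND PROOFS =====

-- A's fuelled while loop computes B's recursion once the fuel dominates the window width
theorem helperLoopA_eq_firstOneB (arr : List Int) :
    ∀ (fuel : Nat) (l h : Int), (h - l + 1).toNat < fuel →
      helperLoopA arr fuel l h = firstOneB arr l h := by
  intro fuel
  induction fuel with
  | zero => intro l h hf; omega
  | succ f ih =>
    intro l h hf
    rw [helperLoopA, firstOneB]
    have hd := PySem.Int.floordiv_eq_ediv_of_pos (a := h - l) (by omega : (0:Int) < 2)
    by_cases hlt : h < l
    · rw [if_neg (by omega), dif_pos hlt]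
    · rw [if_pos (by omega), dif_neg hlt]
      simp only []
      set mid := l + PySem.Int.floordiv (h - l) 2 with hmid
      by_cases h1 : PySem.List.pyGetD arr mid 0 = 1
      · by_cases h0 : PySem.List.pyGetD arr (mid - 1) 0 = 0 ∨ mid = 0
        · rw [if_pos ⟨h1, h0⟩, if_pos ⟨h1, h0.symm⟩]
        · -- the found-guard is false on both sides and arr[mid] = 1 ≠ 0: both recurse left
          rw [if_neg (show ¬(PySem.List.pyGetD arr mid 0 = 1 ∧
                (PySem.List.pyGetD arr (mid - 1) 0 = 0 ∨ mid = 0)) by tauto),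
              if_neg (show ¬(PySem.List.pyGetD arr mid 0 = 1 ∧
                (mid = 0 ∨ PySem.List.pyGetD arr (mid - 1) 0 = 0)) by tauto),
              if_neg (show ¬(PySem.List.pyGetD arr mid 0 = 0) by simp [h1]),
              if_neg (show ¬(PySem.List.pyGetD arr mid 0 = 0) by simp [h1])]
          exact ih l (mid - 1) (by omega)
      · rw [if_neg (show ¬(PySem.List.pyGetD arr mid 0 = 1 ∧
            (PySem.List.pyGetD arr (mid - 1) 0 = 0 ∨ mid = 0)) by tauto),
            if_neg (show ¬(PySem.List.pyGetD arr mid 0 = 1 ∧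
            (mid = 0 ∨ PySem.List.pyGetD arr (mid - 1) 0 = 0)) by tauto)]
        by_cases hz : PySem.List.pyGetD arr mid 0 = 0
        · rw [if_pos hz, if_pos hz]
          exact ih (mid + 1) h (by omega)
        · rw [if_neg hz, if_neg hz]
          exact ih l (mid - 1) (by omega)

theorem HelperA_eq_firstOneB (arr : List Int) (l h : Int) :
    HelperA arr l h = firstOneB arr l h := by
  rw [HelperA]
  by_cases hlt : h < l
  · rw [if_pos hlt, firstOneB, dif_pos hlt]
  · rw [if_neg hlt]
    exact helperLoopA_eq_firstOneB arr _ l h (by omega)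

-- the two row loops agree on any nonempty list of rows
theorem rows_eq (n : Int) :
    ∀ (rows : List (List Int)), rows ≠ [] → ∀ i : Int,
      rowsA n rows i =
        (match findIdxB n rows i with
         | some p => p
         | none => (i + rows.length - 1, -1)) := by
  intro rows
  induction rows with
  | nil => intro h; exact absurd rfl h
  | cons r rest ih =>
    intro _ i
    rw [rowsA, findIdxB, HelperA_eq_firstOneB]
    by_cases hidx : firstOneB r 0 (n - 1) ≠ -1
    · rw [if_pos (Or.inl hidx), if_pos hidx]
    · rw [if_neg hidx]
      rcases eq_or_ne rest [] with hrest | hne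
      · subst hrest
        rw [if_pos (Or.inr rfl), findIdxB]
        rw [Decidable.not_not] at hidx
        rw [hidx]
        simp
      · rw [if_neg (by tauto), ih hne (i + 1)]
        rcases hfr : findIdxB n rest (i + 1) with _ | p
        · show (i + 1 + (rest.length : Int) - 1, (-1 : Int)) =
            (i + ((r :: rest).length : Int) - 1, -1)
          congr 1
          push_cast [List.length_cons]
          ring
        · rfl

-- ===== VERDICT (by name: the statement is the Claim_ definition above) =====
theorem FirstOne_spec : Claim_equal_FirstOne := by
  intro grid _ hpre
  obtain ⟨hne, hn, _⟩ := hpre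
  unfold Spec_FirstOne FirstOne FirstOne_alt
  simp only []
  have hm : grid.length ≠ 0 := fun h => hne (List.length_eq_zero_iff.mp h)
  rw [if_neg (by omega), if_neg (by omega)]
  rw [rows_eq ((grid.headD []).length : Int) grid hne 0]
  rcases hfr : findIdxB ((grid.headD []).length : Int) grid 0 with _ | p
  · congr 1
    ring
  · rfl
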